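-- pv_equiv track=rewrite | github.com/madeshp006/Assessment-1-for-DAA | assessments/Day 7.py | s_v
-- ===== SOURCE A (Python) =====
-- def s_v(a):
--     from math import gcd
--     n = len(a)
--     dp = [float('inf')] * n
--     dp[0] = 1
--     for i in range(1, n):
--         for j in range(i):
--             if gcd(a[j], a[i]) > 1:
--                 dp[i] = min(dp[i], dp[j] + 1)
--     return dp[-1] if dp[-1] != float('inf') else -1
-- ===== SOURCE B (Python) =====
-- def _prime_factors(m):
--     # distinct prime factors of m (m >= 2) by trial division
--     res = []
--     d = 2
--     while d * d <= m:
--         if m % d == 0: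
--             res.append(d)
--             while m % d == 0:
--                 m //= d
--         d += 1
--     if m > 1:
--         res.append(m)
--     return res
--
--
-- def s_v(a):
--     # per-prime buckets: best[p] = min chain length among earlier elements divisible by p
--     best = {}
--     best_zero = None   # min chain length among earlier zeros
--     best_big = None    # min chain length among earlier elements with |x| > 1
--     cur = None
--     for i, x in enumerate(a):
--         ax = abs(x)
--         if i == 0:
--             cur = 1
--         elif ax > 1:
--             cur = best_zero
--             for p in _prime_factors(ax):
--                 b = best.get(p)
--                 if b is not None and (cur is None or b < cur):
--                     cur = b
--             if cur is not None:
--                 cur += 1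
--         elif ax == 0:
--             cur = None if best_big is None else best_big + 1
--         else:
--             cur = None
--         if cur is not None:
--             if ax > 1:
--                 for p in _prime_factors(ax):
--                     b = best.get(p)
--                     if b is None or cur < b:
--                         best[p] = cur
--                 if best_big is None or cur < best_big:
--                     best_big = cur
--             elif ax == 0:
--                 if best_zero is None or cur < best_zero:
--                     best_zero = cur
--     return -1 if cur is None else cur
-- ===== Notes on version B (the rewrite author's own statement) =====
-- stated objective: faster
-- what changed: A's O(n^2) inner scan comparing gcd(a[j],a[i]) for every earlier j is replaced by per-prime buckets holding the minimum dp value of earlier elements divisible by that prime (plus a zero bucket and a |x|>1 bucket for the gcd-with-0 cases); each element is trial-factorized once and combined only over its own prime factors.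
import Mathlib
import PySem

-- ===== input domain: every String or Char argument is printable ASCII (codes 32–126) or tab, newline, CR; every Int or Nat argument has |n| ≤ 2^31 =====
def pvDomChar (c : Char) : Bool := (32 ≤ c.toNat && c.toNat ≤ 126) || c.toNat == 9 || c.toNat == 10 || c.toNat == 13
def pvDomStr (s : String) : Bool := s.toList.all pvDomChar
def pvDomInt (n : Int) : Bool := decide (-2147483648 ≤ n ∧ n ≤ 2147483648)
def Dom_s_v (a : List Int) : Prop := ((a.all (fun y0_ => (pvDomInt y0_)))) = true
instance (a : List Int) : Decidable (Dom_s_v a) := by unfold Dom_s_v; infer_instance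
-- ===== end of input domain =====

-- B replaces A's O(n^2) pairwise-gcd inner scan by per-prime buckets of the minimum dp value
-- (plus zero/|x|>1 buckets), combining each element over its own prime factors (objective: faster).

-- ===== PORT A =====
-- Python's float('inf') is only an absorbing "unreachable" sentinel here (min(v, inf) = v,
-- inf + 1 = inf, dp[-1] == inf → -1); it is modelled exactly by `none` with `omin` as min.
def omin : Option Int → Option Int → Option Int
  | none, y => y
  | some v, none => some v
  | some v, some w => some (min v w)

-- inner loop `for j in range(i): if gcd(a[j], a[i]) > 1: dp[i] = min(dp[i], dp[j] + 1)`;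
-- all indices are in range, so `List.getD` is exact. math.gcd = Int.gcd (gcd of absolute values).
def innerA (a : List Int) (dp : List (Option Int)) (i : Nat) : Option Int :=
  (List.range i).foldl
    (fun acc j =>
      if 1 < Int.gcd (a.getD j 0) (a.getD i 0) then omin acc ((dp.getD j none).map (· + 1))
      else acc) none

def s_v (a : List Int) : Int :=
  if a.length = 0 then -1   -- Python raises IndexError here (dp[0] on []); excluded by Pre_s_v
  else
    -- dp = [inf]*n; dp[0] = 1; cells are only written at their own round, so the array is
    -- transcribed as the grown prefix (cell i appended when round i has computed it)
    match ((List.range' 1 (a.length - 1)).foldl (fun dp i => dp ++ [innerA a dp i])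
            [some 1]).getLast? with
    | some (some v) => v
    | _ => -1

-- ===== PORT B =====
-- `while m % d == 0: m //= d` of Source B
def stripF (m d : Nat) : Nat :=
  if h : 2 ≤ d ∧ m % d = 0 ∧ 0 < m then stripF (m / d) d else m
termination_by m
decreasing_by exact Nat.div_lt_self h.2.2 (by omega)

theorem stripF_le (m d : Nat) : stripF m d ≤ m := by
  unfold stripF
  by_cases h : 2 ≤ d ∧ m % d = 0 ∧ 0 < m
  · rw [dif_pos h]
    exact le_trans (stripF_le (m / d) d) (Nat.div_le_self m d)
  · rw [dif_neg h]
termination_by m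
decreasing_by exact Nat.div_lt_self h.2.2 (by omega)

-- trial division of Source B's _prime_factors; the running divisor d = k + 2 (it starts at 2)
def tdiv (m k : Nat) : List Nat :=
  if h : (k + 2) * (k + 2) ≤ m then
    if m % (k + 2) = 0 then (k + 2) :: tdiv (stripF m (k + 2)) (k + 1)
    else tdiv m (k + 1)
  else if 1 < m then [m] else []
termination_by m - k
decreasing_by
  · have h2 : k + 2 ≤ (k + 2) * (k + 2) := Nat.le_mul_of_pos_left _ (by omega)
    have := stripF_le m (k + 2); omega
  · have h2 : k + 2 ≤ (k + 2) * (k + 2) := Nat.le_mul_of_pos_left _ (by omega)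
    omega

def primeFacs (m : Nat) : List Nat := tdiv m 0

-- Source B: `b = best.get(p); if b is not None and (cur is None or b < cur): cur = b`
def bGet (cur b : Option Int) : Option Int :=
  match b with
  | none => cur
  | some bv =>
    match cur with
    | none => some bv
    | some c => if bv < c then some bv else cur

-- Source B: `b = best.get(p); if b is None or cur < b: best[p] = cur`
def bUpd (v : Int) (d : PySem.Dict Int Int) (p : Int) : PySem.Dict Int Int :=
  match d.get? p with
  | none => d.insert p v
  | some b => if v < b then d.insert p v else d

-- Source B: `if best_zero is None or cur < best_zero: best_zero = cur` (same for best_big)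
def oUpd (v : Int) (o : Option Int) : Option Int :=
  match o with
  | none => some v
  | some b => if v < b then some v else o

-- one iteration of Source B's loop body; state = (best, best_zero, best_big, cur, i)
def stepB (st : PySem.Dict Int Int × Option Int × Option Int × Option Int × Nat) (x : Int) :
    PySem.Dict Int Int × Option Int × Option Int × Option Int × Nat :=
  let (best, bz, bb, cur, i) := st
  let ax := x.natAbs
  let cur' :=
    if i = 0 then some 1
    else if 1 < ax then
      ((primeFacs ax).foldl (fun (c : Option Int) (p : Nat) => bGet c (best.get? (p : Int))) bz).map (· + 1)
    else if ax = 0 then bb.map (· + 1)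
    else none
  match cur' with
  | none => (best, bz, bb, none, i + 1)
  | some v =>
    if 1 < ax then
      ((primeFacs ax).foldl (fun (d : PySem.Dict Int Int) (p : Nat) => bUpd v d (p : Int)) best, bz, oUpd v bb, some v, i + 1)
    else if ax = 0 then (best, oUpd v bz, bb, some v, i + 1)
    else (best, bz, bb, some v, i + 1)

def s_v_alt (a : List Int) : Int :=
  let st := a.foldl stepB (PySem.Dict.empty, none, none, none, 0)
  match st.2.2.2.1 with
  | none => -1
  | some v => v

-- ===== PRECONDITION & SPEC =====
-- Pre_ excludes only the empty list, on which A raises IndexError (dp[0] on an empty dp).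
def Pre_s_v (a : List Int) : Prop := a ≠ []
instance (a : List Int) : Decidable (Pre_s_v a) := by unfold Pre_s_v; infer_instance
def pvWitness_s_v : List Int := [2, 6, 3]

def Spec_s_v (a : List Int) (out : Int) : Prop := out = s_v_alt a
instance (a : List Int) (out : Int) : Decidable (Spec_s_v a out) := by unfold Spec_s_v; infer_instance

-- ===== CLAIM (what is proved, stated in full; the proofs are below) =====
def Claim_equal_s_v : Prop := ∀ (a : List Int), Dom_s_v a → Pre_s_v a → Spec_s_v a (s_v a)

-- ===== LEMMAS AND PROOFS =====

-- minimum-with-top (`none` = +inf) toolkit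
theorem omin_none_right (x : Option Int) : omin x none = x := by cases x <;> rfl

theorem omin_none_left (x : Option Int) : omin none x = x := rfl

theorem omin_comm (x y : Option Int) : omin x y = omin y x := by
  cases x <;> cases y <;> simp [omin, Int.min_comm]

theorem omin_assoc (x y z : Option Int) : omin (omin x y) z = omin x (omin y z) := by
  cases x <;> cases y <;> cases z <;> simp [omin, Int.min_assoc]

theorem omin_self (x : Option Int) : omin x x = x := by
  cases x <;> simp [omin]

theorem omin_absorb (x y : Option Int) : omin (omin x y) y = omin x y := by
  rw [omin_assoc, omin_self]

theorem omin_map_add (x y : Option Int) :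
    (omin x y).map (· + 1) = omin (x.map (· + 1)) (y.map (· + 1)) := by
  cases x <;> cases y <;> simp [omin]

-- running minimum over j < i
def minOver (f : Nat → Option Int) (i : Nat) : Option Int :=
  (List.range i).foldl (fun acc j => omin acc (f j)) none

theorem foldl_omin_acc {α : Type} (g : α → Option Int) (l : List α) (acc : Option Int) :
    l.foldl (fun a t => omin a (g t)) acc = omin acc (l.foldl (fun a t => omin a (g t)) none) := by
  induction l generalizing acc with
  | nil => simp [omin_none_right]
  | cons x xs ih =>
    simp only [List.foldl_cons]
    rw [ih (omin acc (g x)), ih (omin none (g x)), omin_none_left, omin_assoc]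

theorem minOver_succ (f : Nat → Option Int) (i : Nat) :
    minOver f (i + 1) = omin (minOver f i) (f i) := by
  simp [minOver, List.range_succ]

theorem minOver_congr {f g : Nat → Option Int} (i : Nat) (h : ∀ j, j < i → f j = g j) :
    minOver f i = minOver g i := by
  induction i with
  | zero => rfl
  | succ i ih =>
    rw [minOver_succ, minOver_succ, ih (fun j hj => h j (by omega)), h i (by omega)]

theorem minOver_none (i : Nat) : minOver (fun _ => none) i = none := by
  induction i with
  | zero => rfl
  | succ i ih => rw [minOver_succ, ih, omin_none_right]

theorem minOver_omin (f g : Nat → Option Int) (i : Nat) :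
    minOver (fun j => omin (f j) (g j)) i = omin (minOver f i) (minOver g i) := by
  induction i with
  | zero => rfl
  | succ i ih =>
    rw [minOver_succ, minOver_succ, minOver_succ, ih]
    rw [omin_assoc, omin_assoc]
    congr 1
    rw [← omin_assoc, ← omin_assoc, omin_comm (f i)]

theorem minOver_map (f : Nat → Option Int) (i : Nat) :
    minOver (fun j => (f j).map (· + 1)) i = (minOver f i).map (· + 1) := by
  induction i with
  | zero => rfl
  | succ i ih => rw [minOver_succ, minOver_succ, ih, omin_map_add]

theorem minOver_if_or (P Q : Nat → Prop) [DecidablePred P] [DecidablePred Q]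
    (f : Nat → Option Int) (k : Nat) :
    minOver (fun j => if P j ∨ Q j then f j else none) k
      = omin (minOver (fun j => if P j then f j else none) k)
             (minOver (fun j => if Q j then f j else none) k) := by
  rw [← minOver_omin]
  refine minOver_congr k (fun j _ => ?_)
  by_cases hP : P j <;> by_cases hQ : Q j <;>
    simp [hP, hQ, omin_none_right, omin_none_left, omin_self]

theorem minOver_exists (ps : List Nat) (P : Nat → Nat → Prop)
    [∀ p j, Decidable (P p j)] (f : Nat → Option Int) (k : Nat) :
    minOver (fun j => if ∃ p ∈ ps, P p j then f j else none) k
      = ps.foldl (fun c p => omin c (minOver (fun j => if P p j then f j else none) k)) none := by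
  induction ps with
  | nil =>
    simp only [List.foldl_nil]
    rw [minOver_congr k (g := fun _ => none) (fun j _ => by simp), minOver_none]
  | cons p ps ih =>
    have hc : ∀ j, (if ∃ q ∈ p :: ps, P q j then f j else none)
        = (if P p j ∨ ∃ q ∈ ps, P q j then f j else none) := by
      intro j; simp [List.mem_cons, or_and_right, exists_or]
    rw [minOver_congr k (fun j _ => hc j), minOver_if_or, ih, List.foldl_cons]
    rw [foldl_omin_acc _ ps (omin none _), omin_none_left]

-- A's dp array after the outer rounds 1 .. k (cell i is appended at round i)
def dpl (a : List Int) (k : Nat) : List (Option Int) :=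
  (List.range' 1 k).foldl (fun dp i => dp ++ [innerA a dp i]) [some 1]

def Dv (a : List Int) (j : Nat) : Option Int := (dpl a j).getD j none

theorem dpl_succ (a : List Int) (k : Nat) :
    dpl a (k + 1) = dpl a k ++ [innerA a (dpl a k) (k + 1)] := by
  have : List.range' 1 (k + 1) = List.range' 1 k ++ [1 + 1 * k] := List.range'_concat
  simp only [dpl, this, List.foldl_append, List.foldl_cons, List.foldl_nil, Nat.one_mul]
  rw [Nat.add_comm 1 k]

theorem length_dpl (a : List Int) (k : Nat) : (dpl a k).length = k + 1 := by
  induction k with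
  | zero => rfl
  | succ k ih => rw [dpl_succ]; simp [ih]

theorem getD_dpl (a : List Int) (k j : Nat) (h : j ≤ k) :
    (dpl a k).getD j none = Dv a j := by
  induction k with
  | zero => interval_cases j; rfl
  | succ k ih =>
    rcases Nat.lt_or_ge j (k + 1) with hj | hj
    · rw [dpl_succ, List.getD_append _ _ _ _ (by rw [length_dpl]; omega)]
      exact ih (by omega)
    · have : j = k + 1 := by omega
      subst this; rfl

theorem innerA_eq (a : List Int) (dp : List (Option Int)) (i : Nat) :
    innerA a dp i
      = (minOver (fun j => if 1 < Int.gcd (a.getD j 0) (a.getD i 0) then dp.getD j none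
                           else none) i).map (· + 1) := by
  unfold innerA
  have h1 : (fun (acc : Option Int) (j : Nat) =>
        if 1 < Int.gcd (a.getD j 0) (a.getD i 0) then omin acc ((dp.getD j none).map (· + 1))
        else acc)
      = (fun acc j =>
        omin acc ((if 1 < Int.gcd (a.getD j 0) (a.getD i 0) then dp.getD j none
                   else none).map (· + 1))) := by
    funext acc j
    split <;> simp [omin_none_right]
  rw [h1]
  show minOver _ i = _
  rw [minOver_map]

theorem Dv_succ (a : List Int) (i : Nat) :
    Dv a (i + 1)
      = (minOver (fun j => if 1 < Int.gcd (a.getD j 0) (a.getD (i + 1) 0) then Dv a j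
                           else none) (i + 1)).map (· + 1) := by
  have h0 : Dv a (i + 1) = innerA a (dpl a i) (i + 1) := by
    show (dpl a (i + 1)).getD (i + 1) none = _
    rw [dpl_succ]
    have hl : (dpl a i).length = i + 1 := length_dpl a i
    rw [List.getD_eq_getElem?_getD, List.getElem?_append_right (by omega), hl]
    simp
  rw [h0, innerA_eq]
  congr 1
  refine minOver_congr _ (fun j hj => ?_)
  rw [getD_dpl a i j (by omega)]

theorem s_v_char (a : List Int) (h : a ≠ []) :
    s_v a = match Dv a (a.length - 1) with | some v => v | none => -1 := by
  have hn : a.length ≠ 0 := by simpa using h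
  unfold s_v
  rw [if_neg hn]
  have hfold : (List.range' 1 (a.length - 1)).foldl (fun dp i => dp ++ [innerA a dp i]) [some 1]
      = dpl a (a.length - 1) := rfl
  rw [hfold]
  have hlen : (dpl a (a.length - 1)).length = a.length - 1 + 1 := length_dpl _ _
  have hlast : (dpl a (a.length - 1)).getLast? = some (Dv a (a.length - 1)) := by
    rw [List.getLast?_eq_getElem?, hlen]
    simp only [Nat.add_sub_cancel]
    rw [show Dv a (a.length - 1) = (dpl a (a.length - 1)).getD (a.length - 1) none from rfl,
      List.getD_eq_getElem?_getD]
    cases hx : (dpl a (a.length - 1))[a.length - 1]? with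
    | none => exact absurd (List.getElem?_eq_none_iff.mp hx) (by omega)
    | some v => rfl
  rw [hlast]
  cases Dv a (a.length - 1) <;> rfl

-- ---------- number theory: gcd via shared primes, trial-division correctness ----------

theorem nat_gcd_char (m n : Nat) (hn : 1 < n) :
    1 < Nat.gcd m n ↔ (m = 0 ∨ ∃ p, p.Prime ∧ p ∣ n ∧ p ∣ m ∧ 1 < m) := by
  rcases Nat.eq_zero_or_pos m with hm | hm
  · subst hm; simp [Nat.gcd_zero_left, hn]
  rcases Nat.lt_or_ge m 2 with hm1 | hm2
  · have : m = 1 := by omega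
    subst this
    simp only [Nat.gcd_one_left]
    constructor
    · omega
    · rintro (h | ⟨p, hp, _, hpm, _⟩)
      · omega
      · exact absurd (Nat.le_of_dvd one_pos hpm) (by have := hp.two_le; omega)
  · constructor
    · intro h
      obtain ⟨p, hp, hpd⟩ := Nat.exists_prime_and_dvd (n := Nat.gcd m n) (by omega)
      exact Or.inr ⟨p, hp, hpd.trans (Nat.gcd_dvd_right m n), hpd.trans (Nat.gcd_dvd_left m n), hm2⟩
    · rintro (h | ⟨p, hp, hpn, hpm, _⟩)
      · omega
      · have hdvd : p ∣ Nat.gcd m n := Nat.dvd_gcd hpm hpn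
        have hpos : 0 < Nat.gcd m n := Nat.gcd_pos_of_pos_left n hm
        have := Nat.le_of_dvd hpos hdvd
        have := hp.two_le
        omega

theorem stripF_pos (m d : Nat) (hm : 0 < m) : 0 < stripF m d := by
  unfold stripF
  by_cases h : 2 ≤ d ∧ m % d = 0 ∧ 0 < m
  · rw [dif_pos h]
    exact stripF_pos _ _ (Nat.div_pos (Nat.le_of_dvd hm (Nat.dvd_of_mod_eq_zero h.2.1)) (by omega))
  · rw [dif_neg h]; exact hm
termination_by m
decreasing_by exact Nat.div_lt_self h.2.2 (by omega)

theorem stripF_dvd (m d : Nat) : stripF m d ∣ m := by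
  unfold stripF
  by_cases h : 2 ≤ d ∧ m % d = 0 ∧ 0 < m
  · rw [dif_pos h]
    exact (stripF_dvd (m / d) d).trans (Nat.div_dvd_of_dvd (Nat.dvd_of_mod_eq_zero h.2.1))
  · rw [dif_neg h]
termination_by m
decreasing_by exact Nat.div_lt_self h.2.2 (by omega)

theorem stripF_not_dvd (m d : Nat) (hd : 2 ≤ d) (hm : 0 < m) : ¬ d ∣ stripF m d := by
  unfold stripF
  by_cases h : 2 ≤ d ∧ m % d = 0 ∧ 0 < m
  · rw [dif_pos h]
    exact stripF_not_dvd _ _ hd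
      (Nat.div_pos (Nat.le_of_dvd hm (Nat.dvd_of_mod_eq_zero h.2.1)) (by omega))
  · rw [dif_neg h]
    intro hdm
    exact h ⟨hd, Nat.dvd_iff_mod_eq_zero.mp hdm, hm⟩
termination_by m
decreasing_by exact Nat.div_lt_self h.2.2 (by omega)

theorem stripF_dvd_iff (m q d : Nat) (hq : q.Prime) (hd : d.Prime) (hne : q ≠ d) :
    q ∣ stripF m d ↔ q ∣ m := by
  constructor
  · intro h; exact h.trans (stripF_dvd m d)
  · intro h
    unfold stripF
    by_cases hg : 2 ≤ d ∧ m % d = 0 ∧ 0 < m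
    · rw [dif_pos hg]
      refine (stripF_dvd_iff (m / d) q d hq hd hne).mpr ?_
      have hcop : Nat.Coprime q d := (Nat.coprime_primes hq hd).mpr hne
      have hmul : m = d * (m / d) := (Nat.div_mul_cancel (Nat.dvd_of_mod_eq_zero hg.2.1)).symm ▸
        (Nat.mul_div_cancel' (Nat.dvd_of_mod_eq_zero hg.2.1)).symm
      exact hcop.dvd_of_dvd_mul_left (hmul ▸ h)
    · rw [dif_neg hg]; exact h
termination_by m
decreasing_by exact Nat.div_lt_self hg.2.2 (by omega)

theorem tdiv_mem (m k : Nat) (hm : 0 < m)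
    (hinv : ∀ q, q.Prime → q ∣ m → k + 2 ≤ q) :
    ∀ p, p ∈ tdiv m k ↔ (p.Prime ∧ p ∣ m) := by
  intro p
  unfold tdiv
  by_cases hg : (k + 2) * (k + 2) ≤ m
  · have hkm : k + 2 ≤ m := le_trans (Nat.le_mul_of_pos_left _ (by omega)) hg
    by_cases hmod : m % (k + 2) = 0
    · rw [dif_pos hg, if_pos hmod]
      have hdm : (k + 2) ∣ m := Nat.dvd_of_mod_eq_zero hmod
      have hdp : (k + 2).Prime := by
        have h1 : (k + 2).minFac.Prime := Nat.minFac_prime (by omega)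
        have h2 : (k + 2).minFac ∣ m := (Nat.minFac_dvd _).trans hdm
        have h3 : k + 2 ≤ (k + 2).minFac := hinv _ h1 h2
        have h4 : (k + 2).minFac ≤ k + 2 := Nat.minFac_le (by omega)
        have : (k + 2).minFac = k + 2 := by omega
        rwa [this] at h1
      have hpos' : 0 < stripF m (k + 2) := stripF_pos m (k + 2) hm
      have hinv' : ∀ q, q.Prime → q ∣ stripF m (k + 2) → (k + 1) + 2 ≤ q := by
        intro q hqp hqd
        have hqm : q ∣ m := hqd.trans (stripF_dvd m (k + 2))
        have h5 := hinv q hqp hqm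
        have hqne : q ≠ k + 2 := by
          intro he; subst he
          exact stripF_not_dvd m (k + 2) (by omega) hm hqd
        omega
      rw [List.mem_cons, tdiv_mem (stripF m (k + 2)) (k + 1) hpos' hinv' p]
      constructor
      · rintro (rfl | ⟨hp, hpd⟩)
        · exact ⟨hdp, hdm⟩
        · exact ⟨hp, hpd.trans (stripF_dvd m (k + 2))⟩
      · rintro ⟨hp, hpd⟩
        by_cases he : p = k + 2
        · exact Or.inl he
        · exact Or.inr ⟨hp, (stripF_dvd_iff m p (k + 2) hp hdp he).mpr hpd⟩
    · rw [dif_pos hg, if_neg hmod]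
      have hinv' : ∀ q, q.Prime → q ∣ m → (k + 1) + 2 ≤ q := by
        intro q hqp hqd
        have h5 := hinv q hqp hqd
        have hqne : q ≠ k + 2 := by
          intro he; subst he
          exact hmod (Nat.dvd_iff_mod_eq_zero.mp hqd)
        omega
      exact tdiv_mem m (k + 1) hm hinv' p
  · rw [dif_neg hg]
    by_cases h1 : 1 < m
    · rw [if_pos h1]
      have hmp : m.Prime := by
        by_contra hnp
        have hsq : m.minFac ^ 2 ≤ m := Nat.minFac_sq_le_self (by omega) hnp
        have h2 : m.minFac.Prime := Nat.minFac_prime (by omega)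
        have h3 : k + 2 ≤ m.minFac := hinv _ h2 (Nat.minFac_dvd m)
        have h4 : (k + 2) * (k + 2) ≤ m.minFac * m.minFac := Nat.mul_le_mul h3 h3
        have : m.minFac * m.minFac = m.minFac ^ 2 := by ring
        omega
      simp only [List.mem_singleton]
      constructor
      · rintro rfl; exact ⟨hmp, dvd_rfl⟩
      · rintro ⟨hp, hpd⟩
        exact ((Nat.prime_dvd_prime_iff_eq hp hmp).mp hpd)
    · rw [if_neg h1]
      have hm1 : m = 1 := by omega
      subst hm1
      simp only [List.not_mem_nil, false_iff, not_and]
      intro hp hpd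
      exact absurd (Nat.eq_one_of_dvd_one hpd) hp.ne_one
termination_by m - k
decreasing_by
  · have h2 : k + 2 ≤ (k + 2) * (k + 2) := Nat.le_mul_of_pos_left _ (by omega)
    have := stripF_le m (k + 2); omega
  · have h2 : k + 2 ≤ (k + 2) * (k + 2) := Nat.le_mul_of_pos_left _ (by omega)
    omega

theorem primeFacs_mem (m : Nat) (hm : 0 < m) (p : Nat) :
    p ∈ primeFacs m ↔ (p.Prime ∧ p ∣ m) :=
  tdiv_mem m 0 hm (fun q hq _ => hq.two_le) p

-- ---------- bucket minima and B's loop invariant ----------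

def bmP (a : List Int) (p : Nat) (k : Nat) : Option Int :=
  minOver (fun j => if p ∣ (a.getD j 0).natAbs ∧ 1 < (a.getD j 0).natAbs then Dv a j else none) k

def bmZ (a : List Int) (k : Nat) : Option Int :=
  minOver (fun j => if (a.getD j 0).natAbs = 0 then Dv a j else none) k

def bmB (a : List Int) (k : Nat) : Option Int :=
  minOver (fun j => if 1 < (a.getD j 0).natAbs then Dv a j else none) k

def InvB (a : List Int) (k : Nat)
    (st : PySem.Dict Int Int × Option Int × Option Int × Option Int × Nat) : Prop :=
  st.2.2.2.2 = k ∧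
  (∀ p : Nat, p.Prime → st.1.get? (p : Int) = bmP a p k) ∧
  st.2.1 = bmZ a k ∧
  st.2.2.1 = bmB a k ∧
  (0 < k → st.2.2.2.1 = Dv a (k - 1))

theorem bGet_eq_omin (c b : Option Int) : bGet c b = omin c b := by
  cases b with
  | none => simp [bGet, omin_none_right]
  | some bv =>
    cases c with
    | none => rfl
    | some cv =>
      simp only [bGet, omin]
      split <;> rename_i h
      · rw [Int.min_eq_right (by omega)]
      · rw [Int.min_eq_left (by omega)]

theorem oUpd_eq_omin (v : Int) (o : Option Int) : oUpd v o = omin o (some v) := by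
  cases o with
  | none => rfl
  | some b =>
    simp only [oUpd, omin]
    split <;> rename_i h
    · rw [Int.min_eq_right (by omega)]
    · rw [Int.min_eq_left (by omega)]

theorem bUpd_get? (v : Int) (d : PySem.Dict Int Int) (p q : Int) :
    (bUpd v d p).get? q = if q = p then omin (d.get? q) (some v) else d.get? q := by
  unfold bUpd
  cases hd : d.get? p with
  | none =>
    show (d.insert p v).get? q = _
    rw [PySem.Dict.get?_insert]
    by_cases he : q = p
    · subst he; rw [if_pos rfl, if_pos rfl, hd, omin_none_left]
    · rw [if_neg he, if_neg he]
  | some b =>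
    show (if v < b then d.insert p v else d).get? q = _
    by_cases h : v < b
    · rw [if_pos h, PySem.Dict.get?_insert]
      by_cases he : q = p
      · subst he; rw [if_pos rfl, if_pos rfl, hd]
        simp [omin, Int.min_eq_right (le_of_lt h)]
      · rw [if_neg he, if_neg he]
    · rw [if_neg h]
      by_cases he : q = p
      · subst he; rw [if_pos rfl, hd]
        simp [omin, Int.min_eq_left (Int.not_lt.mp h)]
      · rw [if_neg he]

theorem foldl_bUpd_get? (v : Int) (ps : List Nat) (d : PySem.Dict Int Int) (q : Int) :
    (ps.foldl (fun (d : PySem.Dict Int Int) (p : Nat) => bUpd v d (p : Int)) d).get? q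
      = if ∃ p ∈ ps, (p : Int) = q then omin (d.get? q) (some v) else d.get? q := by
  induction ps generalizing d with
  | nil =>
    rw [List.foldl_nil, if_neg (by rintro ⟨p, hp, _⟩; simp at hp)]
  | cons p ps ih =>
    simp only [List.foldl_cons]
    rw [ih]
    by_cases h1 : (p : Int) = q
    · by_cases h2 : ∃ r ∈ ps, (r : Int) = q
      · rw [if_pos h2, if_pos (by exact ⟨p, List.mem_cons_self, h1⟩)]
        rw [bUpd_get?, if_pos h1.symm, omin_absorb]
      · rw [if_neg h2, if_pos (by exact ⟨p, List.mem_cons_self, h1⟩)]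
        rw [bUpd_get?, if_pos h1.symm]
    · by_cases h2 : ∃ r ∈ ps, (r : Int) = q
      · rw [if_pos h2, if_pos (by obtain ⟨r, hr, he⟩ := h2; exact ⟨r, List.mem_cons_of_mem _ hr, he⟩)]
        rw [bUpd_get?, if_neg (fun he => h1 he.symm)]
      · rw [if_neg h2, if_neg (by rintro ⟨r, hr, he⟩; rcases List.mem_cons.mp hr with rfl | hr
                                  · exact h1 he
                                  · exact h2 ⟨r, hr, he⟩)]
        rw [bUpd_get?, if_neg (fun he => h1 he.symm)]

theorem bmP_succ (a : List Int) (p k : Nat) :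
    bmP a p (k + 1)
      = if p ∣ (a.getD k 0).natAbs ∧ 1 < (a.getD k 0).natAbs then omin (bmP a p k) (Dv a k)
        else bmP a p k := by
  rw [bmP, minOver_succ]
  split
  · rfl
  · rw [omin_none_right]; rfl

theorem bmZ_succ (a : List Int) (k : Nat) :
    bmZ a (k + 1) = if (a.getD k 0).natAbs = 0 then omin (bmZ a k) (Dv a k) else bmZ a k := by
  rw [bmZ, minOver_succ]
  split
  · rfl
  · rw [omin_none_right]; rfl

theorem bmB_succ (a : List Int) (k : Nat) :
    bmB a (k + 1) = if 1 < (a.getD k 0).natAbs then omin (bmB a k) (Dv a k) else bmB a k := by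
  rw [bmB, minOver_succ]
  split
  · rfl
  · rw [omin_none_right]; rfl

-- the key combine step: B's bucket lookup computes exactly A's dp recurrence value
theorem cur_eq_Dv (a : List Int) (k : Nat) (best : PySem.Dict Int Int)
    (bz bb : Option Int)
    (hbest : ∀ p : Nat, p.Prime → best.get? (p : Int) = bmP a p k)
    (hbz : bz = bmZ a k) (hbb : bb = bmB a k) (hk : 0 < k) :
    (if 1 < (a.getD k 0).natAbs then
       (((primeFacs (a.getD k 0).natAbs).foldl
           (fun (c : Option Int) (p : Nat) => bGet c (best.get? (p : Int))) bz).map (· + 1))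
     else if (a.getD k 0).natAbs = 0 then bb.map (· + 1)
     else none)
      = Dv a k := by
  obtain ⟨i, rfl⟩ : ∃ i, k = i + 1 := ⟨k - 1, by omega⟩
  set x := a.getD (i + 1) 0 with hx
  rw [Dv_succ]
  by_cases hax : 1 < x.natAbs
  · rw [if_pos hax]
    have hpos : 0 < x.natAbs := by omega
    -- rewrite the gcd condition through shared primes
    have hchar : ∀ j, (if 1 < Int.gcd (a.getD j 0) x then Dv a j else none)
        = (if ((a.getD j 0).natAbs = 0 ∨
               ∃ p ∈ primeFacs x.natAbs,
                 p ∣ (a.getD j 0).natAbs ∧ 1 < (a.getD j 0).natAbs) then Dv a j else none) := by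
      intro j
      congr 1
      show (1 < Int.gcd (a.getD j 0) x) = _
      rw [Int.gcd]
      rw [nat_gcd_char (a.getD j 0).natAbs x.natAbs hax]
      simp only [eq_iff_iff]
      constructor
      · rintro (h | ⟨p, hp, hpx, hpj, hj⟩)
        · exact Or.inl h
        · exact Or.inr ⟨p, (primeFacs_mem _ hpos p).mpr ⟨hp, hpx⟩, hpj, hj⟩
      · rintro (h | ⟨p, hpm, hpj, hj⟩)
        · exact Or.inl h
        · obtain ⟨hp, hpx⟩ := (primeFacs_mem _ hpos p).mp hpm
          exact Or.inr ⟨p, hp, hpx, hpj, hj⟩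
    rw [minOver_congr _ (fun j _ => hchar j)]
    rw [minOver_if_or]
    rw [minOver_exists]
    -- B's fold over the prime factors
    have hfold : (primeFacs x.natAbs).foldl (fun (c : Option Int) (p : Nat) => bGet c (best.get? (p : Int))) bz
        = (primeFacs x.natAbs).foldl
            (fun c p => omin c
              (minOver (fun j => if p ∣ (a.getD j 0).natAbs ∧ 1 < (a.getD j 0).natAbs
                                 then Dv a j else none) (i + 1))) bz := by
      refine PySem.List.foldl_congr_mem _ _ _ _ (fun c p hp => ?_)
      obtain ⟨hpp, _⟩ := (primeFacs_mem _ hpos p).mp hp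
      rw [bGet_eq_omin, hbest p hpp]
      rfl
    rw [hfold, foldl_omin_acc, hbz]
    rfl
  · rw [if_neg hax]
    by_cases hz : x.natAbs = 0
    · rw [if_pos hz]
      have : ∀ j, j < i + 1 →
          (if 1 < Int.gcd (a.getD j 0) x then Dv a j else none)
            = (if 1 < (a.getD j 0).natAbs then Dv a j else none) := by
        intro j _
        have hx0 : x = 0 := by
          have := Int.natAbs_eq_zero.mp hz; exact this
        rw [hx0]
        rw [Int.gcd_zero_right]
      rw [minOver_congr _ this, hbb]
      rfl
    · rw [if_neg hz]
      have hone : x.natAbs = 1 := by omega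
      have : ∀ j, j < i + 1 →
          (if 1 < Int.gcd (a.getD j 0) x then Dv a j else none) = none := by
        intro j _
        rw [if_neg]
        rw [Int.gcd, hone, Nat.gcd_one_right]
        omega
      rw [minOver_congr _ this, minOver_none]
      rfl

theorem invB_step (a : List Int) (k : Nat)
    (st : PySem.Dict Int Int × Option Int × Option Int × Option Int × Nat)
    (h : InvB a k st) : InvB a (k + 1) (stepB st (a.getD k 0)) := by
  obtain ⟨best, bz, bb, cur, i0⟩ := st
  obtain ⟨hi, hbest, hbz, hbb, hcur⟩ := h
  simp only at hi hbest hbz hbb hcur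
  subst hi
  -- the computed cur' equals Dv a i0
  have hcur' :
      (if i0 = 0 then some 1
       else if 1 < (a.getD i0 0).natAbs then
         (((primeFacs (a.getD i0 0).natAbs).foldl
             (fun (c : Option Int) (p : Nat) => bGet c (best.get? (p : Int))) bz).map (· + 1))
       else if (a.getD i0 0).natAbs = 0 then bb.map (· + 1)
       else none) = Dv a i0 := by
    by_cases hk0 : i0 = 0
    · subst hk0; rw [if_pos rfl]; rfl
    · rw [if_neg hk0]
      exact cur_eq_Dv a i0 best bz bb hbest hbz hbb (by omega)
  -- bucket updates
  unfold stepB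
  simp only
  cases hD : Dv a i0 with
  | none =>
    rw [hD] at hcur'
    rw [hcur']
    show InvB a (i0 + 1) (best, bz, bb, none, i0 + 1)
    refine ⟨rfl, ?_, ?_, ?_, ?_⟩
    · intro p hp
      show best.get? (p : Int) = _
      rw [hbest p hp, bmP_succ, hD]
      split <;> simp [omin_none_right]
    · show bz = _
      rw [hbz, bmZ_succ, hD]; split <;> simp [omin_none_right]
    · show bb = _
      rw [hbb, bmB_succ, hD]; split <;> simp [omin_none_right]
    · intro _; simp [hD]
  | some v =>
    rw [hD] at hcur'
    rw [hcur']
    show InvB a (i0 + 1)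
      (if 1 < (a.getD i0 0).natAbs then
        ((primeFacs (a.getD i0 0).natAbs).foldl
            (fun (d : PySem.Dict Int Int) (p : Nat) => bUpd v d (p : Int)) best,
          bz, oUpd v bb, some v, i0 + 1)
       else if (a.getD i0 0).natAbs = 0 then (best, oUpd v bz, bb, some v, i0 + 1)
       else (best, bz, bb, some v, i0 + 1))
    by_cases hax : 1 < (a.getD i0 0).natAbs
    · rw [if_pos hax]
      refine ⟨rfl, ?_, ?_, ?_, ?_⟩
      · intro p hp
        show ((primeFacs (a.getD i0 0).natAbs).foldl
            (fun (d : PySem.Dict Int Int) (p : Nat) => bUpd v d (p : Int)) best).get? (p : Int) = _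
        rw [foldl_bUpd_get?, hbest p hp, bmP_succ, hD]
        by_cases hc : p ∣ (a.getD i0 0).natAbs ∧ 1 < (a.getD i0 0).natAbs
        · rw [if_pos hc, if_pos ?_]
          exact ⟨p, (primeFacs_mem _ (by omega) p).mpr ⟨hp, hc.1⟩, rfl⟩
        · rw [if_neg hc, if_neg ?_]
          rintro ⟨q, hq, hqe⟩
          obtain ⟨hqp, hqd⟩ := (primeFacs_mem _ (by omega) q).mp hq
          have : q = p := by exact_mod_cast hqe
          subst this
          exact hc ⟨hqd, hax⟩
      · show bz = _
        rw [hbz, bmZ_succ, if_neg (by omega)]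
      · show oUpd v bb = _
        rw [oUpd_eq_omin, hbb, bmB_succ, if_pos hax, hD]
      · intro _; simp [hD]
    · rw [if_neg hax]
      by_cases hz : (a.getD i0 0).natAbs = 0
      · rw [if_pos hz]
        refine ⟨rfl, ?_, ?_, ?_, ?_⟩
        · intro p hp
          show best.get? (p : Int) = _
          rw [hbest p hp, bmP_succ, if_neg (by omega)]
        · show oUpd v bz = _
          rw [oUpd_eq_omin, hbz, bmZ_succ, if_pos hz, hD]
        · show bb = _
          rw [hbb, bmB_succ, if_neg (by omega)]
        · intro _; simp [hD]
      · rw [if_neg hz]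
        refine ⟨rfl, ?_, ?_, ?_, ?_⟩
        · intro p hp
          show best.get? (p : Int) = _
          rw [hbest p hp, bmP_succ, if_neg (by intro hc; omega)]
        · show bz = _
          rw [hbz, bmZ_succ, if_neg hz]
        · show bb = _
          rw [hbb, bmB_succ, if_neg hax]
        · intro _; simp [hD]

theorem invB_all (a : List Int) (k : Nat) (hk : k ≤ a.length) :
    InvB a k ((a.take k).foldl stepB (PySem.Dict.empty, none, none, none, 0)) := by
  induction k with
  | zero =>
    refine ⟨rfl, ?_, rfl, rfl, by omega⟩
    intro p hp
    rfl
  | succ k ih =>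
    have hkl : k < a.length := by omega
    have htake : a.take (k + 1) = a.take k ++ [a.getD k 0] := by
      rw [List.take_add_one]
      congr 1
      rw [List.getElem?_eq_getElem hkl]
      simp [List.getD_eq_getElem?_getD, List.getElem?_eq_getElem hkl]
    rw [htake, List.foldl_append, List.foldl_cons, List.foldl_nil]
    exact invB_step a k _ (ih (by omega))

theorem s_v_alt_char (a : List Int) (h : a ≠ []) :
    s_v_alt a = match Dv a (a.length - 1) with | some v => v | none => -1 := by
  have hlen : 0 < a.length := List.length_pos_iff.mpr h
  have hinv := invB_all a a.length le_rfl
  rw [List.take_of_length_le le_rfl] at hinv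
  obtain ⟨_, _, _, _, hcur⟩ := hinv
  unfold s_v_alt
  show (match (a.foldl stepB (PySem.Dict.empty, none, none, none, 0)).2.2.2.1 with
        | none => -1 | some v => v) = _
  rw [hcur hlen]
  cases Dv a (a.length - 1) <;> rfl

-- ===== VERDICT (by name: the statement is the Claim_ definition above) =====
theorem s_v_spec : Claim_equal_s_v := by
  intro a _ hpre
  unfold Spec_s_v
  rw [s_v_char a hpre, s_v_alt_char a hpre]
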